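-- pv_equiv track=rewrite | github.com/adhithyasash1/dsa | week3/GRPA1.py | DishPrepareOrder
-- ===== SOURCE A (Python) =====
-- def DishPrepareOrder(order_list):
--     D = { }
--     for i in order_list:
--         if i not in D.keys():
--             D[i] = 1
--         else:
--             D[i] += 1
--     L = sorted(D.items(), key=lambda kv:kv[1], reverse=True)
--     ans = sorted(L, key = lambda x: (-x[1], x[0]))
--     res = [ ]
--     for i in ans:
--         res.append(i[0])
--     return res
-- ===== SOURCE B (Python) =====
-- def DishPrepareOrder(order_list):
--     freq = {}
--     for i in order_list:
--         freq[i] = freq.get(i, 0) + 1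
--     buckets = {}
--     for k, c in freq.items():
--         buckets.setdefault(c, []).append(k)
--     res = []
--     for c in sorted(buckets, reverse=True):
--         res.extend(sorted(buckets[c]))
--     return res
-- ===== Notes on version B (the rewrite author's own statement) =====
-- stated objective: alternative
-- what changed: Instead of A's two global sorts of the (key, count) pairs by value and then by (-count, key), B inverts the frequency dict into a count-to-keys bucket table and emits the buckets in descending count order, each sorted ascending.
import Mathlib
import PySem

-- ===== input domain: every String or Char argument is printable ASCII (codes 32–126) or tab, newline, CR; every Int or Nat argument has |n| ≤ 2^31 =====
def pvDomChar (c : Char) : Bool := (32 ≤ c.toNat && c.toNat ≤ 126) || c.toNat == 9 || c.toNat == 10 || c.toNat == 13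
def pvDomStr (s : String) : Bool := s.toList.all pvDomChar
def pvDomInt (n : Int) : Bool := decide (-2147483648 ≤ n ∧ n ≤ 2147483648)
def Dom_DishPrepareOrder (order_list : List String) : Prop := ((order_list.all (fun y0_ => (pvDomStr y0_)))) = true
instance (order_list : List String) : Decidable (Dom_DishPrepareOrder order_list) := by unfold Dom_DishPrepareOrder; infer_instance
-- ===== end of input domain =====

-- B replaces A's two global sorts on the (count, key) pairs by a count-indexed bucket table
-- walked in descending count order, each bucket sorted ascending (objective: alternative).

-- ===== PORT A =====
def DishPrepareOrder (order_list : List String) : List String :=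
  let D := order_list.foldl
    (fun D i => if !(D.contains i) then D.insert i 1 else D.insert i (D.getD i 0 + 1))
    (PySem.Dict.empty : PySem.Dict String Int)
  let L := PySem.List.sorted D.items (fun kv => kv.2) true
  let ans := PySem.List.sorted2 L (fun x => -x.2) (fun x => x.1)
  let res := ans.foldl (fun res i => res ++ [i.1]) []
  res

-- ===== PORT B =====
def DishPrepareOrder_alt (order_list : List String) : List String :=
  let freq := order_list.foldl (fun d i => d.insert i (d.getD i 0 + 1))
    (PySem.Dict.empty : PySem.Dict String Int)
  let buckets := freq.items.foldl
    (fun d p => d.modify p.2 [] (fun l => l ++ [p.1]))   -- buckets.setdefault(c, []).append(k)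
    (PySem.Dict.empty : PySem.Dict Int (List String))
  let res := (PySem.List.sorted buckets.keys (fun c => c) true).foldl
    (fun res c => res ++ PySem.List.sorted (buckets.getD c []) (fun k => k)) []
    -- c ranges over buckets' own keys, so Python's buckets[c] never raises; d[c] = getD c []
  res

-- ===== PRECONDITION & SPEC =====
def Spec_DishPrepareOrder (order_list : List String) (out : List String) : Prop := out = DishPrepareOrder_alt order_list
instance (order_list : List String) (out : List String) : Decidable (Spec_DishPrepareOrder order_list out) := by unfold Spec_DishPrepareOrder; infer_instance

-- ===== CLAIM (what is proved, stated in full; the proofs are below) =====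
def Claim_equal_DishPrepareOrder : Prop := ∀ (order_list : List String), Dom_DishPrepareOrder order_list → Spec_DishPrepareOrder order_list (DishPrepareOrder order_list)

-- ===== LEMMAS AND PROOFS =====

-- the combined sort key of A's final sort, as a single lexicographic linear order
def pvKey (p : String × Int) : Lex (Int × String) := toLex (-p.2, p.1)

-- the keys having count c, in item order
def pvBucket (its : List (String × Int)) (c : Int) : List String :=
  (its.filter (fun p => p.2 == c)).map (·.1)

-- the canonical result as (key, count) pairs: counts strictly descending, keys ascending within
def pvCanon (its : List (String × Int)) : List (String × Int) :=
  (PySem.List.sorted (PySem.Set.ofList (its.map (·.2))) (fun c => c) true).flatMap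
    (fun c => (PySem.List.sorted (pvBucket its c) (fun k => k)).map (fun k => (k, c)))

lemma pvKey_inj : Function.Injective pvKey := by
  intro p q h
  have h' : ((-p.2 : Int), p.1) = ((-q.2 : Int), q.1) := by simpa [pvKey] using h
  have h1 : (-p.2 : Int) = -q.2 := congrArg Prod.fst h'
  have h2 : p.1 = q.1 := congrArg Prod.snd h'
  exact Prod.ext h2 (by omega)

lemma pvFoldl_fst (l : List (String × Int)) (acc : List String) :
    l.foldl (fun r i => r ++ [i.1]) acc = acc ++ l.map (·.1) := by
  induction l generalizing acc with
  | nil => simp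
  | cons a t ih => simp [ih]

lemma pvFlatMap_perm {α κ : Type} [BEq κ] [LawfulBEq κ] (f : α → κ) (l : List α) (cs : List κ)
    (hnd : cs.Nodup) (hcov : ∀ x ∈ l, f x ∈ cs) :
    (cs.flatMap (fun c => l.filter (fun x => f x == c))).Perm l := by
  induction cs generalizing l with
  | nil =>
    simp only [List.flatMap_nil]
    cases l with
    | nil => exact List.Perm.refl _
    | cons a t => exact absurd (hcov a (by simp)) (by simp)
  | cons c cs' ih =>
    simp only [List.flatMap_cons]
    have hrw : cs'.flatMap (fun c' => l.filter (fun x => f x == c')) =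
        cs'.flatMap (fun c' => (l.filter (fun x => !(f x == c))).filter (fun x => f x == c')) := by
      apply List.flatMap_congr
      intro c' hc'
      rw [List.filter_filter]
      apply List.filter_congr
      intro x _
      by_cases h : f x = c'
      · have : c' ≠ c := fun he => (List.nodup_cons.mp hnd).1 (he ▸ hc')
        simp [h, this]
      · simp [h]
    rw [hrw]
    have hih := ih (l := l.filter (fun x => !(f x == c))) (List.nodup_cons.mp hnd).2
      (by
        intro x hx
        rcases List.mem_filter.mp hx with ⟨hx1, hx2⟩
        rcases (by simpa using hcov x hx1 : f x = c ∨ f x ∈ cs') with h | h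
        · simp [h] at hx2
        · exact h)
    exact List.Perm.trans (List.Perm.append_left _ hih) (List.filter_append_perm _ l)

lemma pvPerm_flatMap_congr {α κ : Type} (cs : List κ) (g h : κ → List α)
    (hgh : ∀ c ∈ cs, (g c).Perm (h c)) : (cs.flatMap g).Perm (cs.flatMap h) := by
  induction cs with
  | nil => simp
  | cons c cs' ih =>
    simp only [List.flatMap_cons]
    exact (hgh c (by simp)).append (ih (fun c' hc' => hgh c' (List.mem_cons_of_mem _ hc')))

lemma pvItems_fst_nodup (xs : List String) :
    (((PySem.Dict.counter xs).items).map (·.1)).Nodup := by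
  rw [PySem.Dict.items_counter, List.map_map]
  have h : ((fun (x : String × Int) => x.1) ∘ fun k : String => (k, (List.count k xs : Int))) = id := rfl
  rw [h, List.map_id]
  exact PySem.Set.nodup_ofList xs

lemma pvCanon_perm (xs : List String) :
    (pvCanon ((PySem.Dict.counter xs).items)).Perm ((PySem.Dict.counter xs).items) := by
  set its := (PySem.Dict.counter xs).items with hits
  unfold pvCanon
  set cs := PySem.List.sorted (PySem.Set.ofList (its.map (·.2))) (fun c => c) true with hcs
  have hcsnd : cs.Nodup :=
    (PySem.List.sorted_perm _ _ _).nodup_iff.mpr (PySem.Set.nodup_ofList _)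
  have hcov : ∀ p ∈ its, p.2 ∈ cs := by
    intro p hp
    have : p.2 ∈ PySem.Set.ofList (its.map (·.2)) :=
      (PySem.Set.mem_ofList _ _).mpr (List.mem_map_of_mem hp)
    exact ((PySem.List.sorted_perm _ _ _).mem_iff).mpr this
  refine List.Perm.trans ?_ (pvFlatMap_perm (fun p => p.2) its cs hcsnd hcov)
  apply pvPerm_flatMap_congr
  intro c _
  have h1 : (PySem.List.sorted (pvBucket its c) (fun k => k) false).Perm (pvBucket its c) :=
    PySem.List.sorted_perm _ _ _
  refine List.Perm.trans (h1.map (fun k => (k, c))) ?_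
  have heq : ((its.filter (fun p => p.2 == c)).map (·.1)).map (fun k => (k, c)) =
      its.filter (fun p => p.2 == c) := by
    rw [List.map_map]
    conv_rhs => rw [← List.map_id (its.filter (fun p => p.2 == c))]
    apply List.map_congr_left
    intro p hp
    have h2 : p.2 = c := by simpa using (List.mem_filter.mp hp).2
    simp [Function.comp, ← h2]
  unfold pvBucket
  rw [heq]

lemma pvCanon_pairwise (xs : List String) :
    (pvCanon ((PySem.Dict.counter xs).items)).Pairwise (fun a b => pvKey a < pvKey b) := by
  set its := (PySem.Dict.counter xs).items with hits
  have hfst : (its.map (·.1)).Nodup := pvItems_fst_nodup xs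
  unfold pvCanon
  rw [List.pairwise_flatMap]
  constructor
  · intro c _
    rw [List.pairwise_map]
    have hle := PySem.List.sorted_pairwise (pvBucket its c) (fun k => k)
    have hnd : (PySem.List.sorted (pvBucket its c) (fun k => k) false).Nodup := by
      refine (PySem.List.sorted_perm _ _ _).nodup_iff.mpr ?_
      exact List.Nodup.sublist (List.Sublist.map _ List.filter_sublist) hfst
    refine (hle.and hnd).imp ?_
    intro a b hab
    have hlt : a < b := lt_of_le_of_ne hab.1 hab.2
    exact Prod.Lex.toLex_lt_toLex.mpr (Or.inr ⟨rfl, hlt⟩)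
  · have hdesc := PySem.List.sorted_pairwise_rev (PySem.Set.ofList (its.map (·.2))) (fun c => c)
    have hndcs : (PySem.List.sorted (PySem.Set.ofList (its.map (·.2))) (fun c => c) true).Nodup :=
      (PySem.List.sorted_perm _ _ _).nodup_iff.mpr (PySem.Set.nodup_ofList _)
    refine ((hdesc.and hndcs).imp ?_)
    intro c₁ c₂ h x hx y hy
    have hlt : c₂ < c₁ := lt_of_le_of_ne h.1 (Ne.symm h.2)
    rcases List.mem_map.mp hx with ⟨k, _, rfl⟩
    rcases List.mem_map.mp hy with ⟨k', _, rfl⟩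
    exact Prod.Lex.toLex_lt_toLex.mpr (Or.inl (by omega))

lemma pvSorted2_eq (l : List (String × Int)) :
    PySem.List.sorted2 l (fun x => -x.2) (fun x => x.1) = PySem.List.sorted l pvKey := by
  have hbe : (fun (a b : String × Int) =>
        decide ((-a.2 : Int) < -b.2) || (!decide ((-b.2 : Int) < -a.2) && decide (a.1 < b.1)))
      = (fun a b => decide (pvKey a < pvKey b)) := by
    funext a b
    have hiff : (pvKey a < pvKey b) ↔ ((-a.2 : Int) < -b.2 ∨ ((-a.2 : Int) = -b.2 ∧ a.1 < b.1)) :=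
      Prod.Lex.toLex_lt_toLex
    by_cases h1 : (-a.2 : Int) < -b.2 <;> by_cases h2 : (-b.2 : Int) < -a.2 <;>
      by_cases h3 : a.1 < b.1 <;> simp [h1, h2, h3, hiff] <;> omega
  simp only [PySem.List.sorted2, PySem.List.sorted]
  rw [hbe]
  simp

lemma pvA_eq_canon (xs : List String) :
    PySem.List.sorted ((PySem.Dict.counter xs).items) pvKey = pvCanon ((PySem.Dict.counter xs).items) :=
  PySem.List.sorted_eq_of_perm_of_pairwise_lt _ _ _ (pvCanon_perm xs) (pvCanon_pairwise xs)

lemma pvA_result (xs : List String) :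
    DishPrepareOrder xs = (pvCanon ((PySem.Dict.counter xs).items)).map (·.1) := by
  simp only [DishPrepareOrder]
  have hfun : (fun (D : PySem.Dict String Int) i =>
        if !(D.contains i) then D.insert i 1 else D.insert i (D.getD i 0 + 1))
      = fun D i => D.insert i (D.getD i 0 + 1) := by
    funext D i
    by_cases h : D.contains i
    · simp [h]
    · have h0 : D.getD i 0 = 0 :=
        PySem.Dict.getD_of_not_contains D 0 (by simpa using h)
      simp [h, h0]
  rw [hfun, PySem.Dict.foldl_insert_getD_add_one_eq_counter]
  rw [pvSorted2_eq]
  rw [PySem.List.sorted_eq_sorted_of_perm _ _ pvKey pvKey_inj (PySem.List.sorted_perm _ _ _)]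
  rw [pvA_eq_canon]
  rw [pvFoldl_fst]
  rw [List.nil_append]

lemma pvB_result (xs : List String) :
    DishPrepareOrder_alt xs = (pvCanon ((PySem.Dict.counter xs).items)).map (·.1) := by
  simp only [DishPrepareOrder_alt]
  rw [PySem.Dict.foldl_insert_getD_add_one_eq_counter]
  have hkeys : ((PySem.Dict.counter xs).items.foldl
        (fun d p => d.modify p.2 [] (fun l => l ++ [p.1]))
        (PySem.Dict.empty : PySem.Dict Int (List String))).keys
      = PySem.Set.ofList (((PySem.Dict.counter xs).items).map (·.2)) := by
    have := PySem.Dict.keys_foldl_modify_key ((PySem.Dict.counter xs).items)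
      (fun p => p.2) [] (fun d p => fun l => l ++ [p.1])
      (PySem.Dict.empty : PySem.Dict Int (List String))
    simpa [PySem.Dict.keys_empty, PySem.Set.update_nil_left] using this
  have hgetD : ∀ c : Int, ((PySem.Dict.counter xs).items.foldl
        (fun d p => d.modify p.2 [] (fun l => l ++ [p.1]))
        (PySem.Dict.empty : PySem.Dict Int (List String))).getD c []
      = pvBucket ((PySem.Dict.counter xs).items) c := by
    intro c
    have hfold : (PySem.Dict.counter xs).items.foldl
          (fun d p => d.modify p.2 [] (fun l => l ++ [p.1]))
          (PySem.Dict.empty : PySem.Dict Int (List String))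
        = (((PySem.Dict.counter xs).items).map (fun p => (p.2, p.1))).foldl
          (fun d q => d.modify q.1 [] (fun l => l ++ [q.2]))
          (PySem.Dict.empty : PySem.Dict Int (List String)) := by
      rw [List.foldl_map]
    rw [hfold, PySem.Dict.getD_foldl_modify_append]
    rw [PySem.Dict.getD_empty]
    rw [List.filter_map, List.map_map]
    rfl
  rw [hkeys]
  rw [PySem.List.foldl_append_eq_flatMap]
  rw [List.nil_append]
  unfold pvCanon
  rw [List.map_flatMap]
  apply List.flatMap_congr
  intro c _
  rw [hgetD c, List.map_map]
  have h : ((fun (x : String × Int) => x.1) ∘ fun k : String => (k, c)) = id := rfl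
  rw [h, List.map_id]

-- ===== VERDICT (by name: the statement is the Claim_ definition above) =====
theorem DishPrepareOrder_spec : Claim_equal_DishPrepareOrder := by
  intro xs _
  unfold Spec_DishPrepareOrder
  rw [pvA_result, pvB_result]
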